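-- pv_equiv track=rewrite | github.com/dogewzy/checkio | Compass, Map and Spyglass.py | navigation
-- ===== SOURCE A (Python) =====
-- def navigation(seaside):
--     def distance(coordinate1, coordinate2):
--         x1, y1 = coordinate1
--         x2, y2 = coordinate2
--
--         return max(abs(x1 - x2), abs((y1 - y2)))
--
--     for y, row in enumerate(seaside):
--         for x, item in enumerate(row):
--             if item == 'Y':
--                 y_ = (x, y)
--             elif item == 'S':
--                 s = (x, y)
--             elif item == 'C':
--                 c = (x, y)
--             elif item == 'M':
--                 m = (x, y)
--     return distance(y_, s) + distance(y_, c) + distance(y_, m)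
-- ===== SOURCE B (Python) =====
-- def navigation(seaside):
--     def locate(ch):
--         # search rows from the bottom up; rfind gives the last occurrence in a row,
--         # so this returns the last occurrence of ch in row-major order (as A keeps).
--         for y in range(len(seaside) - 1, -1, -1):
--             x = seaside[y].rfind(ch)
--             if x != -1:
--                 return x, y
--     yx, yy = locate('Y')
--     return sum(max(abs(yx - x), abs(yy - y)) for x, y in map(locate, 'SCM'))
-- ===== Notes on version B (the rewrite author's own statement) =====
-- stated objective: alternative
-- what changed: Replaces A's single forward sweep carrying four marker variables through an if/elif chain by four independent staged searches: for each marker, scan rows bottom-up and take str.rfind's last in-row hit, which yields the same row-major last occurrence without any accumulated state.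
import Mathlib
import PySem

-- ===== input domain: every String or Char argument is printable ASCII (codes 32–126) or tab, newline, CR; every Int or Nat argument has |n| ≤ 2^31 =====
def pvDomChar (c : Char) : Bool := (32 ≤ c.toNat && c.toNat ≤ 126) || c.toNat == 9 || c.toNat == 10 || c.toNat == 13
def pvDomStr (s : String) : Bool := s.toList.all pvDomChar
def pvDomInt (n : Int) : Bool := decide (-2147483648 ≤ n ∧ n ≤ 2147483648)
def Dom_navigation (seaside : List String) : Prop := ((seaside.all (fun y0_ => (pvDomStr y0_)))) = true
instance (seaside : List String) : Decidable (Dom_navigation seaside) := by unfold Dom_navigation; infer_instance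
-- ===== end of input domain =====

-- B replaces A's single forward sweep with four accumulator variables by four independent
-- staged searches (bottom-up row scan + in-row rfind); return-value equality is proved.

-- ===== PORT A =====
-- A's nested-for scan keeping four variables y_, s, c, m (last occurrence wins);
-- Python leaves them unbound when a marker is missing (NameError) — those inputs are
-- outside Pre_, the port uses a (0,0) default there.
def navDist (c1 c2 : Int × Int) : Int := max |c1.1 - c2.1| |c1.2 - c2.2|

def navStateA := Option (Int × Int) × Option (Int × Int) × Option (Int × Int) × Option (Int × Int)

def navStepA (st : navStateA) (y x : Int) (item : Char) : navStateA :=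
  if item = 'Y' then (some (x, y), st.2)
  else if item = 'S' then (st.1, some (x, y), st.2.2)
  else if item = 'C' then (st.1, st.2.1, some (x, y), st.2.2.2)
  else if item = 'M' then (st.1, st.2.1, st.2.2.1, some (x, y))
  else st

def navigation (seaside : List String) : Int :=
  let st : navStateA :=
    (PySem.List.enumerate seaside 0).foldl
      (fun st yr =>
        (PySem.List.enumerate yr.2.toList 0).foldl
          (fun st xi => navStepA st yr.1 xi.1 xi.2) st)
      (none, none, none, none)
  let y_ := st.1.getD (0, 0)
  navDist y_ (st.2.1.getD (0, 0)) + navDist y_ (st.2.2.1.getD (0, 0)) +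
    navDist y_ (st.2.2.2.getD (0, 0))

-- ===== PORT B =====
-- str.rfind(ch) for a single character: last index of ch, or -1 (exact contract of the builtin)
def navRfind (l : List Char) (ch : Char) : Int :=
  (PySem.List.enumerate l 0).foldl (fun acc xi => if xi.2 = ch then xi.1 else acc) (-1)

-- the 'for y in range(len-1, -1, -1)' loop of locate, with its early return
def navLocGo (seaside : List String) (ch : Char) : List Int → Option (Int × Int)
  | [] => none
  | y :: ys =>
      let x := navRfind (PySem.List.pyGetD seaside y "").toList ch
      if x = -1 then navLocGo seaside ch ys else some (x, y)

def navLocate (seaside : List String) (ch : Char) : Option (Int × Int) :=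
  navLocGo seaside ch (PySem.List.pyRange ((seaside.length : Int) - 1) (-1) (-1))

def navigation_alt (seaside : List String) : Int :=
  let yp := (navLocate seaside 'Y').getD (0, 0)
  ['S', 'C', 'M'].foldl
    (fun acc ch =>
      let p := (navLocate seaside ch).getD (0, 0)
      acc + max |yp.1 - p.1| |yp.2 - p.2|) 0

-- ===== PRECONDITION & SPEC =====
-- Pre_ excludes exactly the grids missing one of the four markers: Python A raises NameError
-- there (an unbound variable), and Python B raises TypeError (unpacking None); neither returns.
def Pre_navigation (seaside : List String) : Prop :=
  (∃ r ∈ seaside, 'Y' ∈ r.toList) ∧ (∃ r ∈ seaside, 'S' ∈ r.toList) ∧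
  (∃ r ∈ seaside, 'C' ∈ r.toList) ∧ (∃ r ∈ seaside, 'M' ∈ r.toList)
instance (seaside : List String) : Decidable (Pre_navigation seaside) := by
  unfold Pre_navigation; infer_instance

def pvWitness_navigation : List String := ["YS", "CM"]

def Spec_navigation (seaside : List String) (out : Int) : Prop := out = navigation_alt seaside
instance (seaside : List String) (out : Int) : Decidable (Spec_navigation seaside out) := by
  unfold Spec_navigation; infer_instance

-- ===== CLAIM (what is proved, stated in full; the proofs are below) =====
def Claim_equal_navigation : Prop := ∀ (seaside : List String), Dom_navigation seaside → Pre_navigation seaside → Spec_navigation seaside (navigation seaside)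

-- ===== LEMMAS AND PROOFS =====

-- the common characterisation: last occurrence of c in row-major order
def navLastOcc (seaside : List String) (c : Char) : Option (Int × Int) :=
  (PySem.List.enumerate seaside 0).foldl
    (fun a yr =>
      (PySem.List.enumerate yr.2.toList 0).foldl
        (fun a xi => if xi.2 = c then some (xi.1, yr.1) else a) a)
    none

-- A-side: each component of navStepA is the independent last-occurrence step for its marker
theorem navStepA_comp (st : navStateA) (y x : Int) (item : Char) :
    navStepA st y x item =
      ((if item = 'Y' then some (x, y) else st.1),
       (if item = 'S' then some (x, y) else st.2.1),
       (if item = 'C' then some (x, y) else st.2.2.1),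
       (if item = 'M' then some (x, y) else st.2.2.2)) := by
  unfold navStepA; split_ifs <;> simp_all

theorem foldA_inner (l : List (Int × Char)) (y : Int) (st : navStateA) :
    l.foldl (fun st xi => navStepA st y xi.1 xi.2) st =
      ((l.foldl (fun a xi => if xi.2 = 'Y' then some (xi.1, y) else a) st.1),
       (l.foldl (fun a xi => if xi.2 = 'S' then some (xi.1, y) else a) st.2.1),
       (l.foldl (fun a xi => if xi.2 = 'C' then some (xi.1, y) else a) st.2.2.1),
       (l.foldl (fun a xi => if xi.2 = 'M' then some (xi.1, y) else a) st.2.2.2)) := by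
  induction l generalizing st with
  | nil => rfl
  | cons p t ih => rw [List.foldl_cons, ih, navStepA_comp]; rfl

theorem foldA_outer (rows : List (Int × String)) (st : navStateA) :
    rows.foldl (fun st yr =>
        (PySem.List.enumerate yr.2.toList 0).foldl (fun st xi => navStepA st yr.1 xi.1 xi.2) st) st =
      ((rows.foldl (fun a yr => (PySem.List.enumerate yr.2.toList 0).foldl
          (fun a xi => if xi.2 = 'Y' then some (xi.1, yr.1) else a) a) st.1),
       (rows.foldl (fun a yr => (PySem.List.enumerate yr.2.toList 0).foldl
          (fun a xi => if xi.2 = 'S' then some (xi.1, yr.1) else a) a) st.2.1),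
       (rows.foldl (fun a yr => (PySem.List.enumerate yr.2.toList 0).foldl
          (fun a xi => if xi.2 = 'C' then some (xi.1, yr.1) else a) a) st.2.2.1),
       (rows.foldl (fun a yr => (PySem.List.enumerate yr.2.toList 0).foldl
          (fun a xi => if xi.2 = 'M' then some (xi.1, yr.1) else a) a) st.2.2.2)) := by
  induction rows generalizing st with
  | nil => rfl
  | cons r t ih => rw [List.foldl_cons, ih, foldA_inner]; rfl

-- B-side: the in-row option fold is determined by navRfind's integer fold
theorem row_fold_rfind (l : List Char) (c : Char) (y : Int) :
    ∀ (s : Int) (a : Option (Int × Int)) (r : Int), 0 ≤ s → (r = -1 ∨ 0 ≤ r) →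
      (PySem.List.enumerate l s).foldl (fun a xi => if xi.2 = c then some (xi.1, y) else a)
          (if r = -1 then a else some (r, y)) =
        (if (PySem.List.enumerate l s).foldl (fun acc xi => if xi.2 = c then xi.1 else acc) r = -1
         then a
         else some ((PySem.List.enumerate l s).foldl (fun acc xi => if xi.2 = c then xi.1 else acc) r, y)) := by
  induction l with
  | nil => intro s a r _ _; simp [PySem.List.enumerate_nil]
  | cons ch t ih =>
    intro s a r hs hr
    rw [PySem.List.enumerate_cons]
    by_cases h : ch = c
    · simp only [List.foldl_cons, h, if_pos]
      have hsne : ¬ (s = -1) := by omega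
      have := ih (s + 1) a s (by omega) (Or.inr hs)
      rw [if_neg hsne] at this
      exact this
    · simp only [List.foldl_cons, if_neg h]
      exact ih (s + 1) a r (by omega) hr

theorem row_fold_rfind0 (l : List Char) (c : Char) (y : Int) (a : Option (Int × Int)) :
    (PySem.List.enumerate l 0).foldl (fun a xi => if xi.2 = c then some (xi.1, y) else a) a =
      (if navRfind l c = -1 then a else some (navRfind l c, y)) := by
  have := row_fold_rfind l c y 0 a (-1) le_rfl (Or.inl rfl)
  simpa [navRfind] using this

-- B-side outer loop: the bottom-up scan computes the row-major last occurrence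
theorem locGo_take (seaside : List String) (c : Char) :
    ∀ m : Nat, m ≤ seaside.length →
      navLocGo seaside c (PySem.List.pyRange ((m : Int) - 1) (-1) (-1)) =
        (PySem.List.enumerate (seaside.take m) 0).foldl
          (fun a yr => (PySem.List.enumerate yr.2.toList 0).foldl
              (fun a xi => if xi.2 = c then some (xi.1, yr.1) else a) a) none := by
  intro m
  induction m with
  | zero =>
    intro _
    rw [PySem.List.pyRange_neg_one_eq_nil (by omega)]
    simp [navLocGo, PySem.List.enumerate_nil]
  | succ k ih =>
    intro hm
    have hk : k ≤ seaside.length := by omega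
    have hkl : k < seaside.length := by omega
    have hcons : PySem.List.pyRange ((k : Int) + 1 - 1) (-1) (-1) =
        (k : Int) :: PySem.List.pyRange ((k : Int) - 1) (-1) (-1) := by
      have := PySem.List.pyRange_neg_one_cons (a := (k : Int)) (b := (-1)) (by omega)
      simpa using this
    have htake : seaside.take (k + 1) = seaside.take k ++ [seaside[k]] := by
      rw [List.take_add_one]; simp [List.getElem?_eq_getElem hkl]
    have hget : PySem.List.pyGetD seaside (k : Int) "" = seaside[k] :=
      PySem.List.pyGetD_natCast seaside k "" ▸ (List.getD_eq_getElem seaside "" hkl)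
    push_cast
    rw [hcons]
    unfold navLocGo
    rw [htake, PySem.List.enumerate_append, List.foldl_append]
    have hlen : ((seaside.take k).length : Int) = (k : Int) := by
      simp [List.length_take, Nat.min_eq_left hk]
    simp only [PySem.List.enumerate_cons, PySem.List.enumerate_nil, List.foldl_cons,
      List.foldl_nil, hlen, zero_add, hget]
    rw [row_fold_rfind0]
    by_cases hx : navRfind (seaside[k]).toList c = -1
    · rw [if_pos hx, if_pos hx, ih hk]
    · rw [if_neg hx, if_neg hx]

theorem locate_eq_lastOcc (seaside : List String) (c : Char) :
    navLocate seaside c = navLastOcc seaside c := by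
  have := locGo_take seaside c seaside.length le_rfl
  rw [List.take_length] at this
  exact this

-- ===== VERDICT (by name: the statement is the Claim_ definition above) =====
theorem navigation_spec : Claim_equal_navigation := by
  intro seaside _ _
  unfold Spec_navigation navigation navigation_alt
  rw [foldA_outer]
  simp only [locate_eq_lastOcc, navLastOcc, List.foldl_cons, List.foldl_nil, navDist]
  ring
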